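-- pv_equiv track=rewrite | github.com/MrBrantCode/unitest_baseline | mut_generate/mist_train_cf/cf_83957/solution.py | consonant_count_and_common
-- ===== SOURCE A (Python) =====
-- import collections
-- from typing import Tuple
--
-- def consonant_count_and_common(s: str) -> Tuple[int, str]:
--     s = s.lower()  # lower case to ensure it works for both cases
--     consonants = [char for char in s if char in 'bcdfghjklmnpqrstvwxyz']  # list of consonants in s
--
--     if not consonants:
--         return 0, None  # if no consonants found
--
--     counter = collections.Counter(consonants)  # count the frequency of each consonant
--
--     common_consonants = [k for k, c in counter.items() if c == max(counter.values())]  # Get keys with max value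
--
--     common_consonants.sort()  # sort to get the first alphabetically
--
--     return len(consonants), common_consonants[0]
-- ===== SOURCE B (Python) =====
-- def consonant_count_and_common(s):
--     t = s.lower()
--     total = 0
--     best = None
--     best_cnt = 0
--     for c in 'bcdfghjklmnpqrstvwxyz':
--         k = t.count(c)
--         total += k
--         if k > best_cnt:
--             best_cnt = k
--             best = c
--     return total, best
-- ===== Notes on version B (the rewrite author's own statement) =====
-- stated objective: alternative
-- what changed: B iterates over the fixed 21-letter consonant alphabet in alphabetical order, calling t.count(c) per letter and keeping a running strict-improvement argmax (so the alphabetically-first maximum falls out of the traversal order), instead of A's data-driven pipeline that builds the consonant list, a Counter, a max-filtered key list, and sorts it.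
import Mathlib
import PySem

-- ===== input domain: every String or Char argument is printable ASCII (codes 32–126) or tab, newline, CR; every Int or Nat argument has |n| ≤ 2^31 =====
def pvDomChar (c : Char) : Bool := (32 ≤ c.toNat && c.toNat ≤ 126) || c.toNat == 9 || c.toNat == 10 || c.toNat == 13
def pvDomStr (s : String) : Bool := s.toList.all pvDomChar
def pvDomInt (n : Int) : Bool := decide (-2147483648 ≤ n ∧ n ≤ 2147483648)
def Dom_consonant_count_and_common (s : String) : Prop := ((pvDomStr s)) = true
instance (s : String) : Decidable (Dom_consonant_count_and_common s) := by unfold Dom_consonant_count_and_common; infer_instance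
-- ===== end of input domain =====

-- B walks the fixed consonant alphabet in alphabetical order with a per-letter count and a
-- strict-improvement running argmax, replacing A's list/Counter/max-filter/sort pipeline
-- (return value only; no mutation).

-- the consonant alphabet (A tests membership in it; B iterates over it in alphabetical order;
-- for a single character, Python's substring test 'char in "bcd..."' is exactly membership)
def pvCons : List Char := "bcdfghjklmnpqrstvwxyz".toList

-- ===== PORT A =====
def consonant_count_and_common (s : String) : Int × Option String :=
  let t := (PySem.Str.lower s).toList
  let consonants := t.filter (fun c => pvCons.contains c)
  if consonants.isEmpty then (0, none)
  else
    let counter := PySem.Dict.counter consonants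
    -- Python recomputes max(counter.values()) for each item; the value is the same each time.
    -- values is nonempty here, so the .getD 0 default is never used (Python's max would raise only on empty).
    let common := (counter.items.filter
        (fun p => p.2 == (PySem.List.max? counter.values (fun v => v)).getD 0)).map (fun p => p.1)
    let commonSorted := PySem.List.sorted common (fun k => k)
    ((consonants.length : Int), (PySem.List.pyGet? commonSorted 0).map (fun c => String.ofList [c]))

-- ===== PORT B =====
def consonant_count_and_common_alt (s : String) : Int × Option String :=
  let t := (PySem.Str.lower s).toList
  let st := pvCons.foldl
      (fun (st : Int × Option Char × Int) c =>
        let k : Int := (PySem.Chars.count t [c] : Int)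
        (st.1 + k, if st.2.2 < k then (some c, k) else st.2))
      (0, none, 0)
  (st.1, st.2.1.map (fun c => String.ofList [c]))

-- ===== PRECONDITION & SPEC =====
def Spec_consonant_count_and_common (s : String) (out : Int × Option String) : Prop := out = consonant_count_and_common_alt s
instance (s : String) (out : Int × Option String) : Decidable (Spec_consonant_count_and_common s out) := by unfold Spec_consonant_count_and_common; infer_instance

-- ===== CLAIM (what is proved, stated in full; the proofs are below) =====
def Claim_equal_consonant_count_and_common : Prop := ∀ (s : String), Dom_consonant_count_and_common s → Spec_consonant_count_and_common s (consonant_count_and_common s)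

-- ===== LEMMAS AND PROOFS =====

-- Python's str.count for a single-character needle is per-character counting
theorem pv_count_go (c : Char) :
    ∀ (l : List Char) (fuel acc : Nat), l.length ≤ fuel →
      PySem.Chars.count.go [c] fuel l acc = acc + l.count c := by
  intro l
  induction l with
  | nil => intro fuel acc _; cases fuel <;> simp [PySem.Chars.count.go]
  | cons hd tl ih =>
    intro fuel acc hle
    cases fuel with
    | zero => simp at hle
    | succ f =>
      have hle' : tl.length ≤ f := by simpa using hle
      by_cases hc : c = hd
      · subst hc
        simp [PySem.Chars.count.go, List.isPrefixOf, ih _ _ hle']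
        omega
      · have : (c == hd) = false := by simp [hc]
        simp [PySem.Chars.count.go, List.isPrefixOf, this, ih _ _ hle', Ne.symm hc]

theorem pv_count_singleton (t : List Char) (c : Char) :
    PySem.Chars.count t [c] = t.count c := by
  simp [PySem.Chars.count, pv_count_go c t t.length 0 le_rfl]

-- sum over a duplicate-free alphabet of an occurrence indicator
theorem pv_sum_ind (x : Char) :
    ∀ (L : List Char), L.Nodup →
      (L.map (fun c => if x == c then 1 else 0)).sum = if x ∈ L then (1:Nat) else 0 := by
  intro L
  induction L with
  | nil => simp
  | cons a L' ih =>
    intro hnd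
    have hnd' := hnd.of_cons
    simp only [List.map_cons, List.sum_cons]
    rw [ih hnd']
    by_cases hx : x = a
    · subst hx
      have hnot : x ∉ L' := (List.nodup_cons.mp hnd).1
      simp [hnot]
    · simp [hx]

-- total consonant occurrences = per-letter counts summed over the alphabet
theorem pv_sum_counts (t : List Char) :
    (pvCons.map (fun c => t.count c)).sum = (t.filter (fun c => pvCons.contains c)).length := by
  induction t with
  | nil => simp
  | cons x t ih =>
    have hnd : pvCons.Nodup := by decide
    by_cases hx : x ∈ pvCons
    · have hc : pvCons.contains x = true := by simpa using hx
      simp only [List.count_cons, List.filter_cons, hc, if_true]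
      rw [List.sum_map_add, ih, pv_sum_ind x pvCons hnd, if_pos hx]
      simp [Nat.add_comm]
    · have hc : pvCons.contains x = false := by simpa using hx
      simp only [List.count_cons, List.filter_cons, hc]
      rw [List.sum_map_add, ih, pv_sum_ind x pvCons hnd, if_neg hx]
      simp

-- running max is bounded by any common bound
theorem pv_foldl_max_le (B : Int) :
    ∀ (xs : List Int) (a : Int), a ≤ B → (∀ x ∈ xs, x ≤ B) → xs.foldl max a ≤ B := by
  intro xs
  induction xs with
  | nil => intro a ha _; simpa using ha
  | cons x xs ih =>
    intro a ha hx
    simp only [List.foldl_cons]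
    exact ih _ (max_le ha (hx x (List.mem_cons_self))) (fun y hy => hx y (List.mem_cons_of_mem _ hy))

-- find? on a strictly increasing list returns the unique minimal satisfying element
theorem pv_find_sorted (p : Char → Bool) :
    ∀ (L : List Char), L.Pairwise (· < ·) →
      ∀ h, h ∈ L → p h = true → (∀ y ∈ L, p y = true → h ≤ y) →
      L.find? p = some h := by
  intro L
  induction L with
  | nil => intro _ h hm; exact absurd hm (by simp)
  | cons a L' ih =>
    intro hpw h hm hp hmin
    by_cases hpa : p a = true
    · have hha : h ≤ a := hmin a (List.mem_cons_self) hpa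
      have : h = a := by
        rcases List.mem_cons.mp hm with h1 | h1
        · exact h1
        · exact absurd hha (not_le.mpr ((List.pairwise_cons.mp hpw).1 h h1))
      rw [List.find?_cons_of_pos hpa, this]
    · have hne : h ≠ a := fun hh => hpa (hh ▸ hp)
      have hm' : h ∈ L' := by
        rcases List.mem_cons.mp hm with h1 | h1
        · exact absurd h1 hne
        · exact h1
      rw [List.find?_cons_of_neg (by simp [hpa])]
      exact ih (List.pairwise_cons.mp hpw).2 h hm' hp
        (fun y hy hpy => hmin y (List.mem_cons_of_mem _ hy) hpy)

-- B's single pass, characterised: total = sum of per-letter counts; the kept letter is the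
-- alphabetically first one attaining the running maximum (none while the maximum stays 0)
theorem pv_fold_char (g : Char → Int) :
    ∀ (L : List Char) (tot : Int) (b : Option Char) (bc : Int),
      L.foldl (fun (st : Int × Option Char × Int) c =>
          (st.1 + g c, if st.2.2 < g c then (some c, g c) else st.2)) (tot, b, bc)
      = (tot + (L.map g).sum,
         (if bc < (L.map g).foldl max bc then L.find? (fun c => g c == (L.map g).foldl max bc) else b),
         (L.map g).foldl max bc) := by
  intro L
  induction L with
  | nil => intro tot b bc; simp
  | cons c L' ih =>
    intro tot b bc
    simp only [List.foldl_cons, List.map_cons, List.sum_cons]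
    by_cases hc : bc < g c
    · rw [if_pos hc, ih, max_eq_right (le_of_lt hc)]
      have hle : g c ≤ (L'.map g).foldl max (g c) := (PySem.List.le_foldl_max _ _).1
      by_cases h2 : g c < (L'.map g).foldl max (g c)
      · rw [if_pos h2, if_pos (lt_trans hc h2),
          List.find?_cons_of_neg (by simp [ne_of_lt h2]), add_assoc]
      · have heq : (L'.map g).foldl max (g c) = g c := le_antisymm (not_lt.mp h2) hle
        rw [if_neg h2, heq, if_pos hc, List.find?_cons_of_pos (by simp), add_assoc]
    · rw [if_neg hc, ih, max_eq_left (not_lt.mp hc), add_assoc]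
      by_cases h2 : bc < (L'.map g).foldl max bc
      · rw [if_pos h2, if_pos h2,
          List.find?_cons_of_neg (by simp [ne_of_lt (lt_of_le_of_lt (not_lt.mp hc) h2)])]
      · rw [if_neg h2, if_neg h2]

-- cast the Nat count sum to Int
theorem pv_sum_cast (t : List Char) :
    (pvCons.map (fun c => ((t.count c : Nat) : Int))).sum
      = (((t.filter (fun c => pvCons.contains c)).length : Nat) : Int) := by
  rw [show (pvCons.map (fun c => ((t.count c : Nat) : Int)))
        = (pvCons.map (fun c => t.count c)).map (fun n : Nat => (n : Int)) from by
      simp [List.map_map, Function.comp]]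
  rw [← Nat.cast_list_sum, pv_sum_counts]

-- A's selection (filter-by-max, sort, take head) equals B's alphabet-order argmax
theorem pv_snd (t : List Char)
    (hne : t.filter (fun c => pvCons.contains c) ≠ []) :
    Option.map (fun c => String.ofList [c])
      (PySem.List.pyGet?
        (PySem.List.sorted
          (List.map (fun p => p.1)
            (List.filter (fun p => p.2 == (PySem.List.max? (PySem.Dict.counter (t.filter (fun c => pvCons.contains c))).values fun v => v).getD 0)
              (PySem.Dict.counter (t.filter (fun c => pvCons.contains c))).items))
          fun k => k)
        0)
    = Option.map (fun c => String.ofList [c])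
        (if 0 < (pvCons.map (fun c => ((t.count c : Nat) : Int))).foldl max 0
         then pvCons.find? (fun c => (((t.count c : Nat) : Int) == (pvCons.map (fun c => ((t.count c : Nat) : Int))).foldl max 0))
         else none) := by
  set cs := t.filter (fun c => pvCons.contains c) with hcs
  set M := (pvCons.map (fun c => ((t.count c : Nat) : Int))).foldl max 0 with hM
  -- counts agree on consonants
  have hcount : ∀ c, c ∈ pvCons → cs.count c = t.count c := by
    intro c hc
    exact List.count_filter (by simpa using hc)
  have hmemcs : ∀ c, c ∈ cs → c ∈ pvCons ∧ c ∈ t := by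
    intro c hc
    have := List.mem_filter.mp (hcs ▸ hc)
    exact ⟨by simpa using this.2, this.1⟩
  have hitems : (PySem.Dict.counter cs).items
      = (PySem.Set.ofList cs).map (fun k => (k, (cs.count k : Int))) := PySem.Dict.items_counter cs
  have hvalues : (PySem.Dict.counter cs).values
      = (PySem.Set.ofList cs).map (fun k => (cs.count k : Int)) := by
    simp [PySem.Dict.values, hitems, List.map_map, Function.comp]
  obtain ⟨a, ha⟩ := List.exists_mem_of_ne_nil cs hne
  have haK : a ∈ PySem.Set.ofList cs := (PySem.Set.mem_ofList cs a).mpr ha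
  cases hmx : PySem.List.max? (PySem.Dict.counter cs).values (fun v => v) with
  | none =>
    rw [PySem.List.max?_eq_none_iff, hvalues, List.map_eq_nil_iff] at hmx
    rw [hmx] at haK
    exact (List.not_mem_nil).elim haK
  | some mx =>
    simp only [Option.getD_some]
    have hmxmem := PySem.List.max?_mem hmx
    rw [hvalues] at hmxmem
    obtain ⟨k0, hk0K, hk0⟩ := List.mem_map.mp hmxmem
    have hk0cs : k0 ∈ cs := (PySem.Set.mem_ofList cs k0).mp hk0K
    have hmx_pos : 0 < mx := by
      rw [← hk0]
      exact_mod_cast List.count_pos_iff.mpr hk0cs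
    have hmxmax : ∀ k ∈ PySem.Set.ofList cs, (cs.count k : Int) ≤ mx := by
      intro k hk
      have := PySem.List.max?_isMax hmx (y := (cs.count k : Int))
        (by rw [hvalues]; exact List.mem_map.mpr ⟨k, hk, rfl⟩)
      simpa using this
    -- every per-letter count is ≤ mx
    have hbound : ∀ c ∈ pvCons, ((t.count c : Nat) : Int) ≤ mx := by
      intro c hc
      by_cases h0 : t.count c = 0
      · rw [h0]; exact_mod_cast le_of_lt hmx_pos
      · have hct : c ∈ t := List.count_pos_iff.mp (Nat.pos_of_ne_zero h0)
        have hccs : c ∈ cs := by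
          rw [hcs]; exact List.mem_filter.mpr ⟨hct, by simpa using hc⟩
        have := hmxmax c ((PySem.Set.mem_ofList cs c).mpr hccs)
        rwa [hcount c hc] at this
    -- M = mx
    have hMle : M ≤ mx := by
      rw [hM]
      exact pv_foldl_max_le mx _ 0 (le_of_lt hmx_pos)
        (fun x hx => by
          obtain ⟨c, hc, rfl⟩ := List.mem_map.mp hx
          exact hbound c hc)
    have hk0pv : k0 ∈ pvCons := (hmemcs k0 hk0cs).1
    have hmxle : mx ≤ M := by
      rw [hM]
      have := (PySem.List.le_foldl_max (pvCons.map (fun c => ((t.count c : Nat) : Int))) 0).2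
        ((t.count k0 : Nat) : Int) (List.mem_map.mpr ⟨k0, hk0pv, rfl⟩)
      rw [← hcount k0 hk0pv, hk0] at this
      exact this
    have hMmx : M = mx := le_antisymm hMle hmxle
    have hMpos : 0 < M := hMmx ▸ hmx_pos
    rw [if_pos hMpos]
    -- analyse the sorted common list
    have hk0common : k0 ∈ (List.filter (fun p => p.2 == mx) ((PySem.Dict.counter cs).items)).map
        (fun p => p.1) := by
      refine List.mem_map.mpr ⟨(k0, (cs.count k0 : Int)), ?_, rfl⟩
      refine List.mem_filter.mpr ⟨?_, ?_⟩
      · rw [hitems]; exact List.mem_map.mpr ⟨k0, hk0K, rfl⟩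
      · simpa using hk0
    cases hs : PySem.List.sorted
        ((List.filter (fun p => p.2 == mx) ((PySem.Dict.counter cs).items)).map (fun p => p.1))
        (fun k => k) with
    | nil =>
      rw [PySem.List.sorted_eq_nil_iff] at hs
      rw [hs] at hk0common
      exact (List.not_mem_nil).elim hk0common
    | cons h tl =>
      have hh_mem : h ∈ (List.filter (fun p => p.2 == mx) ((PySem.Dict.counter cs).items)).map
          (fun p => p.1) := by
        rw [← PySem.List.mem_sorted _ (fun k => k) false, hs]
        exact List.mem_cons_self
      obtain ⟨pr, hpr, hpr1⟩ := List.mem_map.mp hh_mem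
      have hpr' := List.mem_filter.mp hpr
      obtain ⟨kh, hkhK, hkh⟩ := List.mem_map.mp (hitems ▸ hpr'.1)
      have hkh1 : kh = h := by rw [← hpr1, ← hkh]
      have hhcs : h ∈ cs := hkh1 ▸ (PySem.Set.mem_ofList cs kh).mp hkhK
      have hhpv : h ∈ pvCons := (hmemcs h hhcs).1
      have hcnt_h : (cs.count h : Int) = mx := by
        have h2 := eq_of_beq hpr'.2
        have h3 : pr.2 = (cs.count kh : Int) := by rw [← hkh]
        rw [← hkh1, ← h3]
        exact h2
      have hmin : ∀ y ∈ (List.filter (fun p => p.2 == mx) ((PySem.Dict.counter cs).items)).map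
          (fun p => p.1), h ≤ y :=
        PySem.List.key_head_sorted_le _ (fun k => k) hs
      -- find? picks exactly h
      have hfind : pvCons.find?
          (fun c => (((t.count c : Nat) : Int) == M)) = some h := by
        apply pv_find_sorted _ pvCons (by decide) h hhpv
        · have : ((t.count h : Nat) : Int) = M := by
            rw [hMmx, ← hcnt_h, hcount h hhpv]
          simp [this]
        · intro y hy hpy
          have hcy : ((t.count y : Nat) : Int) = M := by simpa using hpy
          have hypos : 0 < t.count y := by
            by_contra h0
            have : t.count y = 0 := by omega
            rw [this] at hcy
            exact absurd (hcy ▸ hMpos) (by simp)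
          have hycs : y ∈ cs := by
            rw [hcs]
            exact List.mem_filter.mpr ⟨List.count_pos_iff.mp hypos, by simpa using hy⟩
          have hycommon : y ∈ (List.filter (fun p => p.2 == mx)
              ((PySem.Dict.counter cs).items)).map (fun p => p.1) := by
            refine List.mem_map.mpr ⟨(y, (cs.count y : Int)), ?_, rfl⟩
            refine List.mem_filter.mpr ⟨?_, ?_⟩
            · rw [hitems]; exact List.mem_map.mpr ⟨y, (PySem.Set.mem_ofList cs y).mpr hycs, rfl⟩
            · have : (cs.count y : Int) = mx := by rw [hcount y hy, hcy, hMmx]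
              simp [this]
          exact hmin y hycommon
      rw [hfind]
      simp [PySem.List.pyGet?, PySem.List.pyIdx?]

-- ===== VERDICT (by name: the statement is the Claim_ definition above) =====
-- the whole equivalence, stated over the lowered character list
set_option maxHeartbeats 1600000 in
theorem pv_core (t : List Char) :
    (if (List.filter (fun c => pvCons.contains c) t).isEmpty = true then ((0 : Int), (none : Option String))
     else (((List.filter (fun c => pvCons.contains c) t).length : Int),
       Option.map (fun c => String.ofList [c])
         (PySem.List.pyGet?
           (PySem.List.sorted
             (List.map (fun p => p.1)
               (List.filter
                 (fun p => p.2 == (PySem.List.max? (PySem.Dict.counter (List.filter (fun c => pvCons.contains c) t)).values fun v => v).getD 0)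
                 (PySem.Dict.counter (List.filter (fun c => pvCons.contains c) t)).items))
             fun k => k)
           0)))
    = ((pvCons.foldl (fun (st : Int × Option Char × Int) c =>
          (st.1 + (PySem.Chars.count t [c] : Int),
           if st.2.2 < (PySem.Chars.count t [c] : Int) then (some c, (PySem.Chars.count t [c] : Int)) else st.2))
         (0, none, 0)).1,
       Option.map (fun c => String.ofList [c])
         ((pvCons.foldl (fun (st : Int × Option Char × Int) c =>
            (st.1 + (PySem.Chars.count t [c] : Int),
             if st.2.2 < (PySem.Chars.count t [c] : Int) then (some c, (PySem.Chars.count t [c] : Int)) else st.2))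
           (0, none, 0)).2.1)) := by
  rw [pv_fold_char (fun c => (PySem.Chars.count t [c] : Int)) pvCons 0 none 0]
  simp only [pv_count_singleton]
  by_cases hcs : t.filter (fun c => pvCons.contains c) = []
  · rw [if_pos (by simp only [List.isEmpty_iff]; exact hcs)]
    have hz : ∀ c ∈ pvCons, ((t.count c : Nat) : Int) = 0 := by
      intro c hc
      have hall : ∀ x ∈ t, ¬ pvCons.contains x = true := List.filter_eq_nil_iff.mp hcs
      by_contra h0
      have hpos : 0 < t.count c := by
        rcases Nat.eq_zero_or_pos (t.count c) with h | h
        · exact absurd (by exact_mod_cast h) h0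
        · exact h
      exact hall c (List.count_pos_iff.mp hpos) (by simpa using hc)
    have hM0 : (pvCons.map (fun c => ((t.count c : Nat) : Int))).foldl max 0 = 0 := by
      refine le_antisymm (pv_foldl_max_le 0 _ 0 le_rfl ?_) (PySem.List.le_foldl_max _ _).1
      intro x hx
      obtain ⟨c, hc, rfl⟩ := List.mem_map.mp hx
      exact le_of_eq (hz c hc)
    have hsum : (pvCons.map (fun c => ((t.count c : Nat) : Int))).sum = 0 := by
      rw [pv_sum_cast, hcs]; simp
    rw [hM0, hsum, if_neg (by simp)]
    simp
  · rw [if_neg (by simp only [List.isEmpty_iff]; exact hcs)]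
    refine Prod.ext ?_ ?_
    · rw [pv_sum_cast, zero_add]
    · exact pv_snd t hcs

theorem consonant_count_and_common_spec : Claim_equal_consonant_count_and_common := by
  intro s _
  unfold Spec_consonant_count_and_common
  simp only [consonant_count_and_common, consonant_count_and_common_alt]
  exact pv_core (PySem.Str.lower s).toList
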